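-- pv_equiv track=rewrite | github.com/Rabi7538/SNSVM-ComputerProgram11 | Program 189.py | neon
-- ===== SOURCE A (Python) =====
-- def neon(n):
--     p=n*n
--     sum=0
--     while p!=0:
--         r=p%10
--         sum+=r
--         p//=10
--     return sum
-- ===== SOURCE B (Python) =====
-- def neon(n):
--     return sum(ord(d) - 48 for d in str(n * n))
-- ===== Notes on version B (the rewrite author's own statement) =====
-- stated objective: idiomatic
-- what changed: B sums the decimal digits of n*n by iterating over the characters of str(n*n) in one expression, instead of A's while-loop peeling the low digit with modulo and floor division by ten.
import Mathlib
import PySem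

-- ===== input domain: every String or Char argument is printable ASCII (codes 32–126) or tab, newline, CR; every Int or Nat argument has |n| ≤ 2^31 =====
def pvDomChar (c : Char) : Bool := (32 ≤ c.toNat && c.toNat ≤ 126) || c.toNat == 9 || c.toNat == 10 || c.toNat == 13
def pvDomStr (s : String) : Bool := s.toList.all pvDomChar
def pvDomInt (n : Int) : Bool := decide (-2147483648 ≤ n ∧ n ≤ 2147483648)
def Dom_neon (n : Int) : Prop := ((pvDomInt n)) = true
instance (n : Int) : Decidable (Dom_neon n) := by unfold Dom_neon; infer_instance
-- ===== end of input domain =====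

-- B changes the digit traversal: it sums the characters of str(n*n) instead of A's digit-peeling division loop (objective: idiomatic).

-- ===== PORT A =====
-- A's while-loop runs on p = n*n, which is ≥ 0, so Python's floor `%`/`//` on p
-- coincide with Nat `%`/`/`; the loop is ported as structural recursion on p.toNat.
def neonGo (p : Nat) (sum : Int) : Int :=
  if p = 0 then sum
  else neonGo (p / 10) (sum + (p % 10 : Int))
termination_by p
decreasing_by exact Nat.div_lt_self (Nat.pos_of_ne_zero (by assumption)) (by omega)

def neon (n : Int) : Int := neonGo (n * n).toNat 0

-- ===== PORT B =====
def neon_alt (n : Int) : Int :=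
  ((PySem.Int.toStr (n * n)).toList.map (fun c => (c.toNat : Int) - 48)).sum

-- ===== PRECONDITION & SPEC =====
def Spec_neon (n : Int) (out : Int) : Prop := out = neon_alt n
instance (n : Int) (out : Int) : Decidable (Spec_neon n out) := by unfold Spec_neon; infer_instance

-- ===== CLAIM (what is proved, stated in full; the proofs are below) =====
def Claim_equal_neon : Prop := ∀ (n : Int), Dom_neon n → Spec_neon n (neon n)

-- ===== LEMMAS AND PROOFS =====

-- digit sum of a natural number (proof-side characterisation)
def digS (m : Nat) : Int :=
  if m = 0 then 0 else (m % 10 : Int) + digS (m / 10)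
termination_by m
decreasing_by exact Nat.div_lt_self (Nat.pos_of_ne_zero (by assumption)) (by omega)

lemma digS_step (m : Nat) : (m % 10 : Int) + digS (m / 10) = digS m := by
  by_cases h : m = 0
  · subst h; simp [digS]
  · conv_rhs => rw [digS]
    simp [h]

lemma neonGo_eq (m : Nat) (acc : Int) : neonGo m acc = acc + digS m := by
  induction m using Nat.strong_induction_on generalizing acc with
  | _ m ih =>
    by_cases h : m = 0
    · subst h; simp [neonGo, digS]
    · rw [neonGo, digS]
      simp only [h, if_false]
      rw [ih (m / 10) (Nat.div_lt_self (Nat.pos_of_ne_zero h) (by omega))]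
      ring

lemma digitChar_val (d : Nat) (hd : d < 10) :
    ((Nat.digitChar d).toNat : Int) - 48 = (d : Int) := by
  interval_cases d <;> decide

lemma csum_toDigitsCore (fuel : Nat) :
    ∀ (m : Nat) (ds : List Char), m < fuel →
      ((Nat.toDigitsCore 10 fuel m ds).map (fun c => (c.toNat : Int) - 48)).sum
        = (m % 10 : Int) + digS (m / 10)
          + (ds.map (fun c => (c.toNat : Int) - 48)).sum := by
  induction fuel with
  | zero => intro m ds h; omega
  | succ f ih =>
    intro m ds h
    rw [Nat.toDigitsCore]
    by_cases h10 : m / 10 = 0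
    · simp [h10, digS, digitChar_val (m % 10) (Nat.mod_lt _ (by omega))]
    · simp only [h10, if_false]
      rw [ih (m / 10) _ (by
        have hm : 0 < m := by
          rcases Nat.eq_zero_or_pos m with h0 | h0
          · exact absurd (by simp [h0]) h10
          · exact h0
        have := Nat.div_lt_self hm (by omega : (1:Nat) < 10)
        omega)]
      rw [← digS_step (m / 10)]
      simp [digitChar_val (m % 10) (Nat.mod_lt _ (by omega))]
      ring

lemma csum_toDigits (m : Nat) :
    ((Nat.toDigits 10 m).map (fun c => (c.toNat : Int) - 48)).sum = digS m := by
  rw [Nat.toDigits, csum_toDigitsCore (m + 1) m [] (by omega)]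
  simp [digS_step]

-- ===== VERDICT (by name: the statement is the Claim_ definition above) =====
theorem neon_spec : Claim_equal_neon := by
  intro n _
  show neon n = neon_alt n
  have hsq : ¬ (n * n < 0) := by have := mul_self_nonneg n; omega
  rw [neon, neon_alt, PySem.Int.toList_toStr, PySem.Int.toChars]
  simp only [hsq, if_false]
  rw [csum_toDigits, neonGo_eq]
  simp
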